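-- pv_equiv track=rewrite | github.com/MSLNZ/msl-qt | msl/qt/editor/python/hyperlink.py | draw_hyperlink_from_scopes
-- ===== SOURCE A (Python) =====
-- def draw_hyperlink_from_scopes(scopes):
--     for scope in scopes[::-1]:
--         if scope.startswith('comment.typehint'):
--             return True
--         elif scope.startswith('string.quoted'):
--             return False
--         elif scope.startswith('string.regexp'):
--             return False
--         elif scope.startswith('comment.line'):
--             return False
--         elif scope.startswith('constant.numeric'):
--             return False
--     return True
-- ===== SOURCE B (Python) =====
-- _TABLE = [
--     ("comment.typehint", True),
--     ("string.quoted", False),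
--     ("string.regexp", False),
--     ("comment.line", False),
--     ("constant.numeric", False),
-- ]
--
--
-- def draw_hyperlink_from_scopes(scopes):
--     verdict = True
--     for scope in scopes:
--         for prefix, value in _TABLE:
--             if scope.startswith(prefix):
--                 verdict = value
--                 break
--     return verdict
-- ===== Notes on version B (the rewrite author's own statement) =====
-- stated objective: alternative
-- what changed: Replaces the reversed-scan with early return and an elif chain by a single forward pass over a (prefix, verdict) table that keeps the last matching verdict in an accumulator (last-match-forward equals first-match-in-reverse).
import Mathlib
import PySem

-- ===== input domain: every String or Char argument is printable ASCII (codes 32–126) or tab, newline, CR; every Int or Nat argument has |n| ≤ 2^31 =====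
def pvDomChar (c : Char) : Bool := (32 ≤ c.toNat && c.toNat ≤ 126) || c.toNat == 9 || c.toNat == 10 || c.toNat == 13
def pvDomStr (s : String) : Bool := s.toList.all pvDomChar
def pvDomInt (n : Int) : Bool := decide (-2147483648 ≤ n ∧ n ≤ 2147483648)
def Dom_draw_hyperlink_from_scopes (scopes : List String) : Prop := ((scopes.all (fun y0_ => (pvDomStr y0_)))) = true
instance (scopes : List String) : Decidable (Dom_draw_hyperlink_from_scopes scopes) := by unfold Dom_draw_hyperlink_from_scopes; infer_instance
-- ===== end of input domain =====

-- B replaces A's reversed scan with early return by a forward full pass over a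
-- (prefix, verdict) table keeping the last matching verdict (alternative decomposition, same cost).


-- ===== PORT A =====
-- the for-loop with early returns, scanning the already-reversed list
def pvALoop : List String → Bool
  | [] => true
  | scope :: rest =>
    if PySem.Str.startswith scope "comment.typehint" then true
    else if PySem.Str.startswith scope "string.quoted" then false
    else if PySem.Str.startswith scope "string.regexp" then false
    else if PySem.Str.startswith scope "comment.line" then false
    else if PySem.Str.startswith scope "constant.numeric" then false
    else pvALoop rest

-- scopes[::-1] is PySem.List.slice? with step -1; the step is -1 ≠ 0 so it is always `some`
def draw_hyperlink_from_scopes (scopes : List String) : Bool :=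
  pvALoop ((PySem.List.slice? scopes none none (-1)).getD [])

-- ===== PORT B =====
def pvTable : List (String × Bool) :=
  [("comment.typehint", true), ("string.quoted", false), ("string.regexp", false),
   ("comment.line", false), ("constant.numeric", false)]

-- inner loop of B: first table prefix matching `scope`, with break = first match
def pvVerdict? (scope : String) : Option Bool :=
  pvTable.findSome? (fun pv => if PySem.Str.startswith scope pv.1 then some pv.2 else none)

def draw_hyperlink_from_scopes_alt (scopes : List String) : Bool :=
  scopes.foldl (fun verdict scope => (pvVerdict? scope).getD verdict) true

-- ===== PRECONDITION & SPEC =====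
def Spec_draw_hyperlink_from_scopes (scopes : List String) (out : Bool) : Prop := out = draw_hyperlink_from_scopes_alt scopes
instance (scopes : List String) (out : Bool) : Decidable (Spec_draw_hyperlink_from_scopes scopes out) := by unfold Spec_draw_hyperlink_from_scopes; infer_instance

-- ===== CLAIM (what is proved, stated in full; the proofs are below) =====
def Claim_equal_draw_hyperlink_from_scopes : Prop := ∀ (scopes : List String), Dom_draw_hyperlink_from_scopes scopes → Spec_draw_hyperlink_from_scopes scopes (draw_hyperlink_from_scopes scopes)

-- ===== LEMMAS AND PROOFS =====

-- A's loop with an arbitrary default value in place of the final `return True`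
def pvALoopD : List String → Bool → Bool
  | [], acc => acc
  | scope :: rest, acc =>
    if PySem.Str.startswith scope "comment.typehint" then true
    else if PySem.Str.startswith scope "string.quoted" then false
    else if PySem.Str.startswith scope "string.regexp" then false
    else if PySem.Str.startswith scope "comment.line" then false
    else if PySem.Str.startswith scope "constant.numeric" then false
    else pvALoopD rest acc

theorem pvALoop_eq_D (l : List String) : pvALoop l = pvALoopD l true := by
  induction l with
  | nil => rfl
  | cons s rest ih => simp [pvALoop, pvALoopD, ih]

-- A's elif chain on one scope is exactly B's table lookup
theorem pvALoopD_cons (s : String) (rest : List String) (acc : Bool) :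
    pvALoopD (s :: rest) acc = (pvVerdict? s).getD (pvALoopD rest acc) := by
  simp only [pvALoopD, pvVerdict?, pvTable, List.findSome?]
  split_ifs <;> rfl

theorem pvALoopD_append_singleton (l : List String) (x : String) (acc : Bool) :
    pvALoopD (l ++ [x]) acc = pvALoopD l ((pvVerdict? x).getD acc) := by
  induction l with
  | nil => simp [pvALoopD_cons, pvALoopD]
  | cons s rest ih =>
    rw [List.cons_append, pvALoopD_cons, pvALoopD_cons, ih]

theorem pvALoopD_reverse_eq_foldl (xs : List String) (acc : Bool) :
    pvALoopD xs.reverse acc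
      = xs.foldl (fun verdict scope => (pvVerdict? scope).getD verdict) acc := by
  induction xs generalizing acc with
  | nil => rfl
  | cons x xs ih =>
    rw [List.reverse_cons, pvALoopD_append_singleton, ih, List.foldl_cons]

-- ===== VERDICT (by name: the statement is the Claim_ definition above) =====
theorem draw_hyperlink_from_scopes_spec : Claim_equal_draw_hyperlink_from_scopes := by
  intro scopes _
  unfold Spec_draw_hyperlink_from_scopes draw_hyperlink_from_scopes draw_hyperlink_from_scopes_alt
  rw [PySem.List.slice?_none_none_neg_one]
  simp only [Option.getD_some]
  rw [pvALoop_eq_D, pvALoopD_reverse_eq_foldl]
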